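-- pv_equiv track=rewrite | github.com/nickponline/aoc-2025 | 6/main.py | calculate
-- ===== SOURCE A (Python) =====
-- def calculate(grid, operators):
--     if not grid:
--         return [], []
--
--     num_cols = len(grid[0])
--
--     # Calculate sum of each column
--     a = []
--     for col in range(num_cols):
--         col_sum = sum(grid[row][col] for row in range(len(grid)))
--         a.append(col_sum)
--
--     # Calculate product of each column
--     b = []
--     for col in range(num_cols):
--         col_prod = 1
--         for row in range(len(grid)):
--             if grid[row][col] != 0:
--                 col_prod *= grid[row][col]
--         b.append(col_prod)
--
--     ret = [ a[i] if operators[i] == '+' else b[i] for i in range(num_cols) ]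
--     return sum(ret)
-- ===== SOURCE B (Python) =====
-- def calculate(grid, operators):
--     if not grid:
--         return [], []
--
--     def agg(op, column):
--         if op == '+':
--             return sum(column)
--         prod = 1
--         for v in column:
--             if v != 0:
--                 prod *= v
--         return prod
--
--     return sum(agg(op, column) for op, column in zip(operators, zip(*grid)))
-- ===== Notes on version B (the rewrite author's own statement) =====
-- stated objective: idiomatic
-- what changed: Instead of A's two index-addressed passes that build a column-sum table and a column-product table and then a selecting comprehension, B transposes the grid with zip(*grid), pairs each column with its operator via zip, and sums one aggregate (sum or zero-skipping product) per column.
-- outside the precondition, e.g. on calculate([], []): A returns ([], []), B returns ([], [])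
import Mathlib
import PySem

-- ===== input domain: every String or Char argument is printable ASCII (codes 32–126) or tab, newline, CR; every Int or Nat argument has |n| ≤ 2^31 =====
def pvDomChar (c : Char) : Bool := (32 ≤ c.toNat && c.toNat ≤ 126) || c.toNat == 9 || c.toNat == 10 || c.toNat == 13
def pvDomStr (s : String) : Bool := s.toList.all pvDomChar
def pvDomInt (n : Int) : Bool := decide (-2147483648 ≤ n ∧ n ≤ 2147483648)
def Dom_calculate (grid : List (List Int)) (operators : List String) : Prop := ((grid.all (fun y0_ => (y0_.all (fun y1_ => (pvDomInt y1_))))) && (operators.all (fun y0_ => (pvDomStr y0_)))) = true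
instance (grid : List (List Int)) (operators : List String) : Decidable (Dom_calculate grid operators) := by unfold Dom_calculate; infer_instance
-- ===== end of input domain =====

-- B transposes the grid (Python's zip(*grid)), pairs each column with its operator,
-- and sums a per-column aggregate, instead of A's building of two full index-addressed
-- tables and a selecting comprehension (objective: idiomatic). The return value is
-- claimed equal only on Pre_: on an empty grid both Pythons return a pair of lists, not an int.

-- ===== PORT A =====
-- Pre_ guarantees every index below is in range, so in-range getD is exact there.
def calculate (grid : List (List Int)) (operators : List String) : Int :=
  if grid = [] then 0  -- Python returns ([], []) here, not an int; excluded by Pre_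
  else
    let numCols := grid.headI.length
    let a := (List.range numCols).map (fun col =>
      ((List.range grid.length).map (fun row => (grid.getD row []).getD col 0)).sum)
    let b := (List.range numCols).map (fun col =>
      (List.range grid.length).foldl (fun p row =>
        if (grid.getD row []).getD col 0 ≠ 0 then p * (grid.getD row []).getD col 0 else p) 1)
    let ret := (List.range numCols).map (fun i =>
      if operators.getD i "" = "+" then a.getD i 0 else b.getD i 0)
    ret.sum

-- ===== PORT B =====
-- the helper 'agg' of Source B
def pvAgg (op : String) (column : List Int) : Int :=
  if op = "+" then column.sum
  else column.foldl (fun p v => if v ≠ 0 then p * v else p) 1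

-- Python's zip(*g): keeps taking heads while every row is nonempty (g nonempty)
def pvTransp (g : List (List Int)) : List (List Int) :=
  if h : g ≠ [] ∧ g.all (fun r => !r.isEmpty) then
    (g.map List.headI) :: pvTransp (g.map List.tail)
  else []
termination_by g.headI.length
decreasing_by
  obtain ⟨hne, hall⟩ := h
  cases g with
  | nil => exact absurd rfl hne
  | cons x xs =>
    have hx : ¬ x.isEmpty := by
      have := List.all_eq_true.mp hall x (by simp)
      simpa using this
    cases x with
    | nil => simp at hx
    | cons v vs => simp [List.headI]

def calculate_alt (grid : List (List Int)) (operators : List String) : Int :=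
  if grid = [] then 0  -- Python B returns ([], []) here, not an int; excluded by Pre_
  else ((operators.zip (pvTransp grid)).map (fun p => pvAgg p.1 p.2)).sum

-- ===== PRECONDITION & SPEC =====
-- Pre_ excludes: the empty grid, where A returns the pair ([], []) rather than an int;
-- rows shorter than row 0 and operator lists shorter than row 0, where A raises IndexError.
def Pre_calculate (grid : List (List Int)) (operators : List String) : Prop :=
  grid ≠ [] ∧ (∀ r ∈ grid, grid.headI.length ≤ r.length) ∧ grid.headI.length ≤ operators.length
instance (grid : List (List Int)) (operators : List String) : Decidable (Pre_calculate grid operators) := by unfold Pre_calculate; infer_instance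

def pvWitness_calculate : List (List Int) × List String := ([[1, 2], [3, 0]], ["+", "*"])

def Spec_calculate (grid : List (List Int)) (operators : List String) (out : Int) : Prop := out = calculate_alt grid operators
instance (grid : List (List Int)) (operators : List String) (out : Int) : Decidable (Spec_calculate grid operators out) := by unfold Spec_calculate; infer_instance

-- ===== CLAIM (what is proved, stated in full; the proofs are below) =====
def Claim_equal_calculate : Prop := ∀ (grid : List (List Int)) (operators : List String), Dom_calculate grid operators → Pre_calculate grid operators → Spec_calculate grid operators (calculate grid operators)

-- ===== LEMMAS AND PROOFS =====

theorem pv_getD_map_range {α : Type} (f : Nat → α) (d : α) {n i : Nat} (h : i < n) :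
    ((List.range n).map f).getD i d = f i := by
  simp [List.getD, h]

-- (range g.length).map (fun i => f (g.getD i d)) walks g itself
theorem pv_map_range_getD {α β : Type} (g : List α) (d : α) (f : α → β) :
    (List.range g.length).map (fun i => f (g.getD i d)) = g.map f := by
  induction g with
  | nil => simp
  | cons x xs ih =>
    rw [List.length_cons, List.range_succ_eq_map, List.map_cons, List.map_map]
    simpa using ih

-- zipping a list with a map over an initial range reads the list by index
theorem pv_zip_map_range {β : Type} (ops : List String) (f : Nat → β) (n : Nat)
    (h : n ≤ ops.length) :
    ops.zip ((List.range n).map f)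
      = (List.range n).map (fun c => (ops.getD c "", f c)) := by
  induction n generalizing ops f with
  | zero => simp
  | succ m ih =>
    cases ops with
    | nil => simp at h
    | cons o os =>
      rw [List.range_succ_eq_map, List.map_cons, List.map_cons, List.map_map,
        List.zip_cons_cons, List.map_map]
      have h' : m ≤ os.length := by simpa using h
      rw [ih os (f ∘ Nat.succ) h']
      simp [List.getD, Function.comp]

-- the transpose of a rectangular-enough grid, column by column
theorem pv_transp_eq (g : List (List Int)) (n : Nat) (hne : g ≠ [])
    (hhead : g.headI.length = n) (hall : ∀ r ∈ g, n ≤ r.length) :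
    pvTransp g = (List.range n).map (fun c => g.map (fun r => r.getD c 0)) := by
  induction n generalizing g with
  | zero =>
    rw [pvTransp]
    have : ¬ (g ≠ [] ∧ g.all (fun r => !r.isEmpty)) := by
      intro ⟨_, hall'⟩
      have hmem : g.headI ∈ g := by cases g with
        | nil => exact absurd rfl hne
        | cons x xs => simp [List.headI]
      have := List.all_eq_true.mp hall' _ hmem
      rw [List.isEmpty_iff_length_eq_zero.mpr hhead] at this
      simp at this
    rw [dif_neg this]
    simp
  | succ m ih =>
    have hallne : g.all (fun r => !r.isEmpty) := by
      refine List.all_eq_true.mpr (fun r hr => ?_)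
      have := hall r hr
      have : r.length ≠ 0 := by omega
      simpa [List.isEmpty_iff_length_eq_zero] using this
    rw [pvTransp, dif_pos ⟨hne, hallne⟩]
    have hmapne : g.map List.tail ≠ [] := by simpa using hne
    have hhead' : (g.map List.tail).headI.length = m := by
      cases g with
      | nil => exact absurd rfl hne
      | cons x xs => simp [List.headI] at hhead ⊢; omega
    have hall' : ∀ r ∈ g.map List.tail, m ≤ r.length := by
      intro r hr
      obtain ⟨s, hs, rfl⟩ := List.mem_map.mp hr
      have := hall s hs
      simp; omega
    rw [ih (g.map List.tail) hmapne hhead' hall']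
    rw [List.range_succ_eq_map, List.map_cons, List.map_map]
    congr 1
    · refine List.map_congr_left (fun r hr => ?_)
      have := hall r hr
      cases r with
      | nil => simp at this
      | cons v vs => simp [List.headI, List.getD]
    · refine List.map_congr_left (fun c _ => ?_)
      rw [List.map_map]
      refine List.map_congr_left (fun r hr => ?_)
      have := hall r hr
      cases r with
      | nil => simp at this
      | cons v vs => simp [List.getD]

-- ===== VERDICT (by name: the statement is the Claim_ definition above) =====
theorem calculate_spec : Claim_equal_calculate := by
  intro grid operators _ hpre
  obtain ⟨hne, hrows, hops⟩ := hpre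
  unfold Spec_calculate calculate calculate_alt
  rw [if_neg hne, if_neg hne]
  dsimp only
  rw [pv_transp_eq grid grid.headI.length hne rfl hrows,
    pv_zip_map_range operators _ _ hops, List.map_map]
  refine congrArg List.sum (List.map_congr_left ?_)
  intro i hi
  have hi' : i < grid.headI.length := List.mem_range.mp hi
  rw [pv_getD_map_range _ _ hi']
  unfold pvAgg
  dsimp only [Function.comp]
  by_cases hop : operators.getD i "" = "+"
  · rw [if_pos hop, if_pos hop]
    exact congrArg List.sum (pv_map_range_getD grid [] (fun r => r.getD i 0))
  · rw [if_neg hop, pv_getD_map_range _ _ hi']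
    rw [if_neg hop, ← pv_map_range_getD grid [] (fun r => r.getD i 0), List.foldl_map]
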